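-- pv_equiv track=rewrite | github.com/ikb-a/llm_lib_learning_fails | data_analysis/utils.py | split_lemma_into_statement_and_proof
-- ===== SOURCE A (Python) =====
-- def split_lemma_into_statement_and_proof(lemma_str: str):
--     lemma = lemma_str.split()
--     assert lemma[0] in ["lemma", "theorem", "definition", "fun"], lemma
--
--     statements = []
--     proofs = []
--     in_statement = None
--     for word in lemma:
--         if word in ["lemma", "theorem", "definition", "fun"]:
--             in_statement = True
--             statements.append([])
--         elif word in ["proof", "by"]:
--             in_statement = False
--             proofs.append([])
--
--         assert isinstance(in_statement, bool)
--         if in_statement: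
--             statements[-1].append(word)
--         else:
--             proofs[-1].append(word)
--
--     return [" ".join(x) for x in statements], [" ".join(x) for x in proofs]
-- ===== SOURCE B (Python) =====
-- def split_lemma_into_statement_and_proof(lemma_str: str):
--     words = lemma_str.split()
--     assert words[0] in ["lemma", "theorem", "definition", "fun"], words
--
--     # Scan BACKWARDS: collect trailing non-keyword words in `cur`; on reaching a
--     # keyword the segment is complete, so emit it (prepended, keeping order) into
--     # the list chosen by that keyword, and reset `cur`.
--     statements, proofs, cur = [], [], []
--     for w in reversed(words):
--         if w in ("lemma", "theorem", "definition", "fun"):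
--             statements = [" ".join([w] + cur)] + statements
--             cur = []
--         elif w in ("proof", "by"):
--             proofs = [" ".join([w] + cur)] + proofs
--             cur = []
--         else:
--             cur = [w] + cur
--     return statements, proofs
-- ===== Notes on version B (the rewrite author's own statement) =====
-- stated objective: alternative
-- what changed: Replaces A's forward scan with an in_statement flag and in-place mutation of the last bucket by a backward scan that builds the outputs back-to-front: trailing words are held in a pending buffer and a whole segment is emitted the moment its opening keyword is reached, so no mode flag and no mutable last element exist.
import Mathlib
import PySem

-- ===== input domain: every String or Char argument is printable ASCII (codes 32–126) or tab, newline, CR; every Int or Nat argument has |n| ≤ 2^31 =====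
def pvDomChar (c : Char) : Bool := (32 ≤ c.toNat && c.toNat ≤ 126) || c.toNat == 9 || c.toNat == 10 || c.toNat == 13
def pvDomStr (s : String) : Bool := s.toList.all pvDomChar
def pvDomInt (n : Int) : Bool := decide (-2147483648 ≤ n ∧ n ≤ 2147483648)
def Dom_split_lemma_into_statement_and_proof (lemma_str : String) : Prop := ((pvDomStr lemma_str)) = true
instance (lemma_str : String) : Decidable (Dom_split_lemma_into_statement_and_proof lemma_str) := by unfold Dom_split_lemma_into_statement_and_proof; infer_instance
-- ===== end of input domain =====

-- B replaces A's forward flag-driven scan by a backward scan that emits each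
-- completed segment at its opening keyword, building the outputs back-to-front; same O(n) cost.

def isStmtKw (w : String) : Bool := w == "lemma" || w == "theorem" || w == "definition" || w == "fun"
def isProofKw (w : String) : Bool := w == "proof" || w == "by"

-- ===== PORT A =====
-- statements[-1].append(word): modify the last sublist in place
def pvAppendLast : List (List String) → String → List (List String)
  | [], _ => []
  | [x], w => [x ++ [w]]
  | x :: y :: rest, w => x :: pvAppendLast (y :: rest) w

-- one iteration of A's loop; state = (statements, proofs, in_statement).
-- in_statement = none only before the first keyword; Python asserts there (excluded by Pre_), the port leaves the state unchanged.
def pvStepA (s : List (List String) × List (List String) × Option Bool) (word : String) :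
    List (List String) × List (List String) × Option Bool :=
  let s := if isStmtKw word then (s.1 ++ [[]], s.2.1, some true)
           else if isProofKw word then (s.1, s.2.1 ++ [[]], some false)
           else s
  match s with
  | (st, pr, some true) => (pvAppendLast st word, pr, some true)
  | (st, pr, some false) => (st, pvAppendLast pr word, some false)
  | (st, pr, none) => (st, pr, none)

def split_lemma_into_statement_and_proof (lemma_str : String) : List String × List String :=
  let lem := PySem.Str.split₀ lemma_str   -- lemma = lemma_str.split()  ('lemma' is a Lean keyword)
  let s := lem.foldl pvStepA ([], [], none)
  (s.1.map (fun x => PySem.Str.join " " x), s.2.1.map (fun x => PySem.Str.join " " x))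

-- ===== PORT B =====
-- one backward step: state = (statements, proofs, cur); 'for w in reversed(words)' = foldr
def pvStepB (w : String) (acc : List String × List String × List String) :
    List String × List String × List String :=
  if isStmtKw w then ((PySem.Str.join " " (w :: acc.2.2)) :: acc.1, acc.2.1, [])
  else if isProofKw w then (acc.1, (PySem.Str.join " " (w :: acc.2.2)) :: acc.2.1, [])
  else (acc.1, acc.2.1, w :: acc.2.2)

def split_lemma_into_statement_and_proof_alt (lemma_str : String) : List String × List String :=
  let words := PySem.Str.split₀ lemma_str
  let s := words.foldr pvStepB ([], [], [])
  (s.1, s.2.1)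

-- ===== PRECONDITION & SPEC =====
-- Pre_ excludes exactly the inputs where Python A raises: empty input (IndexError on lemma[0])
-- and a first word outside {lemma,theorem,definition,fun} (AssertionError). B raises identically there.
def Pre_split_lemma_into_statement_and_proof (lemma_str : String) : Prop :=
  isStmtKw (PySem.Str.split₀ lemma_str).headI = true
instance (lemma_str : String) : Decidable (Pre_split_lemma_into_statement_and_proof lemma_str) := by
  unfold Pre_split_lemma_into_statement_and_proof; infer_instance

def pvWitness_split_lemma_into_statement_and_proof : String := "lemma foo : x = x proof by simp"

def Spec_split_lemma_into_statement_and_proof (lemma_str : String) (out : List String × List String) : Prop :=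
  out = split_lemma_into_statement_and_proof_alt lemma_str
instance (lemma_str : String) (out : List String × List String) : Decidable (Spec_split_lemma_into_statement_and_proof lemma_str out) := by
  unfold Spec_split_lemma_into_statement_and_proof; infer_instance

-- ===== CLAIM =====
def Claim_equal_split_lemma_into_statement_and_proof : Prop :=
  ∀ (lemma_str : String), Dom_split_lemma_into_statement_and_proof lemma_str →
    Pre_split_lemma_into_statement_and_proof lemma_str →
    Spec_split_lemma_into_statement_and_proof lemma_str (split_lemma_into_statement_and_proof lemma_str)

-- ===== LEMMAS AND PROOFS =====
-- proof-side segmentation: (words before the first keyword, keyword-opened segments)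
def segsR : List String → List String × List (String × List String)
  | [] => ([], [])
  | w :: rest =>
    let p := segsR rest
    if isStmtKw w || isProofKw w then ([], (w, w :: p.1) :: p.2) else (w :: p.1, p.2)

def stOf (segs : List (String × List String)) : List (List String) :=
  (segs.filter (fun s => isStmtKw s.1)).map Prod.snd
def prOf (segs : List (String × List String)) : List (List String) :=
  (segs.filter (fun s => !isStmtKw s.1)).map Prod.snd
def lastKw (segs : List (String × List String)) : String := (segs.getLastD ("", [])).1

-- proof-side forward segmentation step, used only to characterise A's foldl
def pvSegAppend : List (String × List String) → String → List (String × List String)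
  | [], _ => []
  | [(k, ws)], w => [(k, ws ++ [w])]
  | x :: y :: rest, w => x :: pvSegAppend (y :: rest) w

def pvStepSeg (segs : List (String × List String)) (w : String) : List (String × List String) :=
  if isStmtKw w || isProofKw w then segs ++ [(w, [w])] else pvSegAppend segs w

theorem appendLast_concat (l : List (List String)) (x : List String) (w : String) :
    pvAppendLast (l ++ [x]) w = l ++ [x ++ [w]] := by
  induction l with
  | nil => rfl
  | cons a l ih =>
    cases l with
    | nil => rfl
    | cons b l' => simpa [pvAppendLast] using ih

theorem segAppend_concat (l : List (String × List String)) (k : String) (ws : List String) (w : String) :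
    pvSegAppend (l ++ [(k, ws)]) w = l ++ [(k, ws ++ [w])] := by
  induction l with
  | nil => rfl
  | cons a l ih =>
    cases l with
    | nil => rfl
    | cons b l' => simpa [pvSegAppend] using ih

-- A's foldl tracks exactly the classification of the forward segmentation
theorem main_inv (ws : List String) (init : List (String × List String)) (k : String) (sw : List String) :
    ws.foldl pvStepA (stOf (init ++ [(k, sw)]), prOf (init ++ [(k, sw)]), some (isStmtKw k)) =
      (stOf (ws.foldl pvStepSeg (init ++ [(k, sw)])),
       prOf (ws.foldl pvStepSeg (init ++ [(k, sw)])),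
       some (isStmtKw (lastKw (ws.foldl pvStepSeg (init ++ [(k, sw)]))))) := by
  induction ws generalizing init k sw with
  | nil => simp [lastKw]
  | cons w rest ih =>
    by_cases h1 : isStmtKw w
    · have hA : pvStepA (stOf (init ++ [(k, sw)]), prOf (init ++ [(k, sw)]), some (isStmtKw k)) w
          = (stOf ((init ++ [(k, sw)]) ++ [(w, [w])]), prOf ((init ++ [(k, sw)]) ++ [(w, [w])]), some true) := by
        by_cases hk : isStmtKw k
        · simp [pvStepA, h1, hk, stOf, prOf, List.filter_append, ← List.append_assoc, appendLast_concat]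
        · have hk' : isStmtKw k = false := by rwa [Bool.not_eq_true] at hk
          simp [pvStepA, h1, hk', stOf, prOf, List.filter_append, ← List.append_assoc, appendLast_concat]
      have hB : pvStepSeg (init ++ [(k, sw)]) w = (init ++ [(k, sw)]) ++ [(w, [w])] := by
        simp [pvStepSeg, h1]
      have hih := ih (init ++ [(k, sw)]) w [w]
      rw [h1] at hih
      simp only [List.foldl_cons, hA, hB]
      exact hih
    · by_cases h2 : isProofKw w
      · have h1' : isStmtKw w = false := by rwa [Bool.not_eq_true] at h1
        have hA : pvStepA (stOf (init ++ [(k, sw)]), prOf (init ++ [(k, sw)]), some (isStmtKw k)) w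
            = (stOf ((init ++ [(k, sw)]) ++ [(w, [w])]), prOf ((init ++ [(k, sw)]) ++ [(w, [w])]), some false) := by
          by_cases hk : isStmtKw k
          · simp [pvStepA, h1', h2, hk, stOf, prOf, List.filter_append, ← List.append_assoc, appendLast_concat]
          · have hk' : isStmtKw k = false := by rwa [Bool.not_eq_true] at hk
            simp [pvStepA, h1', h2, hk', stOf, prOf, List.filter_append, ← List.append_assoc, appendLast_concat]
        have hB : pvStepSeg (init ++ [(k, sw)]) w = (init ++ [(k, sw)]) ++ [(w, [w])] := by
          simp [pvStepSeg, h2]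
        have hih := ih (init ++ [(k, sw)]) w [w]
        rw [h1'] at hih
        simp only [List.foldl_cons, hA, hB]
        exact hih
      · have hB : pvStepSeg (init ++ [(k, sw)]) w = init ++ [(k, sw ++ [w])] := by
          simp [pvStepSeg, h1, h2, segAppend_concat]
        have hA : pvStepA (stOf (init ++ [(k, sw)]), prOf (init ++ [(k, sw)]), some (isStmtKw k)) w
            = (stOf (init ++ [(k, sw ++ [w])]), prOf (init ++ [(k, sw ++ [w])]), some (isStmtKw k)) := by
          by_cases hk : isStmtKw k
          · simp [pvStepA, h1, h2, hk, stOf, prOf, List.filter_append, ← List.append_assoc, appendLast_concat]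
          · have hk' : isStmtKw k = false := by rwa [Bool.not_eq_true] at hk
            simp [pvStepA, h1, h2, hk', stOf, prOf, List.filter_append, ← List.append_assoc, appendLast_concat]
        simp only [List.foldl_cons, hA, hB]
        exact ih init k (sw ++ [w])

-- the forward segmentation foldl equals the recursive segmentation segsR
theorem seg_foldl (ws : List String) (init : List (String × List String)) (k : String) (sw : List String) :
    ws.foldl pvStepSeg (init ++ [(k, sw)]) =
      (init ++ [(k, sw ++ (segsR ws).1)]) ++ (segsR ws).2 := by
  induction ws generalizing init k sw with
  | nil => simp [segsR]
  | cons w rest ih =>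
    by_cases h : isStmtKw w || isProofKw w
    · have hstep : pvStepSeg (init ++ [(k, sw)]) w = (init ++ [(k, sw)]) ++ [(w, [w])] := by
        simp [pvStepSeg, h]
      simp only [List.foldl_cons, hstep, ih (init ++ [(k, sw)]) w [w], segsR, h, if_pos]
      simp
    · have h' : (isStmtKw w || isProofKw w) = false := by rwa [Bool.not_eq_true] at h
      have hstep : pvStepSeg (init ++ [(k, sw)]) w = init ++ [(k, sw ++ [w])] := by
        simp [pvStepSeg, h', segAppend_concat]
      simp only [List.foldl_cons, hstep, ih init k (sw ++ [w]), segsR, h', if_neg, Bool.false_eq_true,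
        not_false_iff]
      simp
-- B's foldr computes the classification of segsR, with the pre-keyword words in the buffer
theorem B_char (ws : List String) :
    ws.foldr pvStepB ([], [], []) =
      ((stOf (segsR ws).2).map (fun x => PySem.Str.join " " x),
       (prOf (segsR ws).2).map (fun x => PySem.Str.join " " x),
       (segsR ws).1) := by
  induction ws with
  | nil => simp [segsR, stOf, prOf]
  | cons w rest ih =>
    by_cases h1 : isStmtKw w
    · simp [pvStepB, h1, ih, segsR, stOf, prOf]
    · by_cases h2 : isProofKw w
      · have h1' : isStmtKw w = false := by rwa [Bool.not_eq_true] at h1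
        simp [pvStepB, h1', h2, ih, segsR, stOf, prOf]
      · have h1' : isStmtKw w = false := by rwa [Bool.not_eq_true] at h1
        have h2' : isProofKw w = false := by rwa [Bool.not_eq_true] at h2
        simp [pvStepB, h1', h2', ih, segsR]

-- ===== VERDICT =====
theorem split_lemma_into_statement_and_proof_spec : Claim_equal_split_lemma_into_statement_and_proof := by
  intro lemma_str _ hpre
  unfold Pre_split_lemma_into_statement_and_proof at hpre
  unfold Spec_split_lemma_into_statement_and_proof
  unfold split_lemma_into_statement_and_proof split_lemma_into_statement_and_proof_alt
  cases hws : PySem.Str.split₀ lemma_str with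
  | nil => rw [hws] at hpre; simp [isStmtKw] at hpre
  | cons w rest =>
    rw [hws] at hpre
    simp only [List.headI] at hpre
    have hA1 : pvStepA ([], [], none) w = ([[w]], [], some true) := by
      simp [pvStepA, hpre, pvAppendLast]
    have hst0 : stOf ([] ++ [(w, [w])]) = [[w]] := by simp [stOf, hpre]
    have hpr0 : prOf ([] ++ [(w, [w])]) = [] := by simp [prOf, hpre]
    have hmain := main_inv rest [] w [w]
    rw [hst0, hpr0, hpre] at hmain
    have hseg := seg_foldl rest [] w [w]
    rw [hseg] at hmain
    have hBr := B_char rest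
    simp only [List.foldl_cons, List.foldr_cons, hA1, hBr, List.nil_append] at hmain ⊢
    rw [hmain]
    simp [pvStepB, hpre, stOf, prOf]
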